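-- pv_equiv track=rewrite | github.com/Mfoley5454/JoeBot | modelMaker.py | createTrigrams
-- ===== SOURCE A (Python) =====
-- def createTrigrams(dataString):
--     unigramData = dataString.split()
--     trigramList = []
--     isFirstWord = True
--     isSecondWord = False
--     firstWord = unigramData[0]
--     secondWord = unigramData[1]
--     oneStep = ""
--     twoStep = ""
--     for word in unigramData:
--         if((word == firstWord) and (isFirstWord == True)):
--             twoStep = word
--             isFirstWord = False
--             isSecondWord = True
--         elif((word == secondWord) and (isSecondWord == True)):
--             oneStep = word
--             isSecondWord = False
--         else:
--             trigram = [twoStep, oneStep, word]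
--             twoStep = oneStep
--             oneStep = word
--             trigramList.append(trigram)
--     return trigramList
-- ===== SOURCE B (Python) =====
-- def createTrigrams(dataString):
--     words = dataString.split()
--     firstWord = words[0]
--     secondWord = words[1]
--     return [list(t) for t in zip(words, words[1:], words[2:])]
-- ===== Notes on version B (the rewrite author's own statement) =====
-- stated objective: simpler
-- what changed: Replaces the flag-driven sliding-window state machine (twoStep/oneStep/isFirstWord/isSecondWord) with a direct comprehension zipping the word list against its two offset tails; words[0]/words[1] are still read so the IndexError on fewer than two words is preserved.
import Mathlib
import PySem

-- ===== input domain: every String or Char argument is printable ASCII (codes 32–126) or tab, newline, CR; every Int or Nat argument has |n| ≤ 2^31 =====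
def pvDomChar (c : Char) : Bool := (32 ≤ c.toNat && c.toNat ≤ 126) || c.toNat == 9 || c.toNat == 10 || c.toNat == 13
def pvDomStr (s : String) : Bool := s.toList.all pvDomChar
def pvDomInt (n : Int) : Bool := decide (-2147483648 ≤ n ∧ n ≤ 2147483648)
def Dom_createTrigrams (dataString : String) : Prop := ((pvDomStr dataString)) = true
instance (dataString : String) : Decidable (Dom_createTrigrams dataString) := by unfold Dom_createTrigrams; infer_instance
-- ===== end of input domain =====

-- B replaces A's flag-driven sliding-window state machine with a direct zip of three offset views
-- of the word list (objective: simpler). Pre_ excludes inputs with fewer than two words, where A raises IndexError.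

-- ===== PORT A =====
-- loop state: (isFirstWord, isSecondWord, oneStep, twoStep, trigramList)
def createTrigramsStep (firstWord secondWord : String)
    (s : Bool × Bool × String × String × List (List String)) (word : String) :
    Bool × Bool × String × String × List (List String) :=
  let (isFirstWord, isSecondWord, oneStep, twoStep, trigramList) := s
  if word == firstWord && isFirstWord then
    (false, true, oneStep, word, trigramList)
  else if word == secondWord && isSecondWord then
    (isFirstWord, false, word, twoStep, trigramList)
  else
    (isFirstWord, isSecondWord, word, oneStep, trigramList ++ [[twoStep, oneStep, word]])

def createTrigrams (dataString : String) : List (List String) :=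
  let unigramData := PySem.Str.split₀ dataString
  -- unigramData[0] / unigramData[1]: Pre_ excludes the IndexError case (pyGet? = none)
  let firstWord := (PySem.List.pyGet? unigramData 0).getD ""
  let secondWord := (PySem.List.pyGet? unigramData 1).getD ""
  let st := unigramData.foldl (createTrigramsStep firstWord secondWord) (true, false, "", "", [])
  st.2.2.2.2

-- ===== PORT B =====
def createTrigrams_alt (dataString : String) : List (List String) :=
  let words := PySem.Str.split₀ dataString
  -- words[0] / words[1]: bound as in Source B to preserve the IndexError; Pre_ excludes the none case
  let _firstWord := (PySem.List.pyGet? words 0).getD ""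
  let _secondWord := (PySem.List.pyGet? words 1).getD ""
  List.zipWith3 (fun a b c => [a, b, c]) words (words.drop 1) (words.drop 2)

-- ===== PRECONDITION & SPEC =====
-- Pre_: A accesses unigramData[0] and unigramData[1], raising IndexError when the text has fewer than two words.
def Pre_createTrigrams (dataString : String) : Prop :=
  2 ≤ (PySem.Str.split₀ dataString).length
instance (dataString : String) : Decidable (Pre_createTrigrams dataString) := by
  unfold Pre_createTrigrams; infer_instance

def pvWitness_createTrigrams : String := "the quick brown fox"

def Spec_createTrigrams (dataString : String) (out : List (List String)) : Prop := out = createTrigrams_alt dataString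
instance (dataString : String) (out : List (List String)) : Decidable (Spec_createTrigrams dataString out) := by unfold Spec_createTrigrams; infer_instance

-- ===== CLAIM (what is proved, stated in full; the proofs are below) =====
def Claim_equal_createTrigrams : Prop := ∀ (dataString : String), Dom_createTrigrams dataString → Pre_createTrigrams dataString → Spec_createTrigrams dataString (createTrigrams dataString)

-- ===== LEMMAS AND PROOFS =====

-- once both flags are down, every iteration takes the else branch and emits one trigram
lemma createTrigrams_loop_else (fw sw : String) (l : List String) :
    ∀ (one two : String) (acc : List (List String)), ∃ o t,
      l.foldl (createTrigramsStep fw sw) (false, false, one, two, acc)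
        = (false, false, o, t, acc ++ List.zipWith3 (fun a b c => [a, b, c]) (two :: one :: l) (one :: l) l) := by
  induction l with
  | nil => intro one two acc; exact ⟨one, two, by simp [List.zipWith3]⟩
  | cons c l ih =>
    intro one two acc
    obtain ⟨o, t, h⟩ := ih c one (acc ++ [[two, one, c]])
    refine ⟨o, t, ?_⟩
    simp only [List.foldl_cons, createTrigramsStep, Bool.and_false, Bool.false_eq_true,
      if_false]
    rw [h]; simp [List.zipWith3]

-- ===== VERDICT (by name: the statement is the Claim_ definition above) =====

theorem createTrigrams_spec : Claim_equal_createTrigrams := by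
  intro dataString _ hpre
  unfold Spec_createTrigrams createTrigrams createTrigrams_alt
  unfold Pre_createTrigrams at hpre
  obtain ⟨w0, rest1, h1⟩ : ∃ w0 rest1, PySem.Str.split₀ dataString = w0 :: rest1 := by
    cases h : PySem.Str.split₀ dataString with
    | nil => rw [h] at hpre; simp at hpre
    | cons a l => exact ⟨a, l, rfl⟩
  obtain ⟨w1, rest, h2⟩ : ∃ w1 rest, rest1 = w1 :: rest := by
    cases h2 : rest1 with
    | nil => rw [h1, h2] at hpre; simp at hpre
    | cons a l => exact ⟨a, l, rfl⟩
  subst h2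
  rw [h1]
  have e0 : (PySem.List.pyGet? (w0 :: w1 :: rest) (0 : Int)).getD "" = w0 := by
    rw [show (0 : Int) = ((0 : Nat) : Int) by norm_num, PySem.List.pyGet?_natCast]; rfl
  have e1 : (PySem.List.pyGet? (w0 :: w1 :: rest) (1 : Int)).getD "" = w1 := by
    rw [show (1 : Int) = ((1 : Nat) : Int) by norm_num, PySem.List.pyGet?_natCast]; rfl
  simp only [e0, e1]
  -- first two iterations of A's loop take the two flag branches
  have step2 : List.foldl (createTrigramsStep w0 w1) (true, false, "", "", []) (w0 :: w1 :: rest)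
      = List.foldl (createTrigramsStep w0 w1) (false, false, w1, w0, []) rest := by
    simp [createTrigramsStep]
  rw [step2]
  obtain ⟨o, t, h⟩ := createTrigrams_loop_else w0 w1 rest w1 w0 []
  rw [h]; simp
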